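-- pv_equiv track=rewrite | github.com/hayoungleee/algorithmstudy | programmerCT/squareRoot.py | solution
-- ===== SOURCE A (Python) =====
-- def solution(n):
--     answer = 0
--     i = 1
--     a = 1
--     while True:
--         if n == i ** 2 :
--             answer = (i+1)**2
--             break
--         if n == i :
--             answer = -1
--             break
--         i += 1
--     return answer
-- ===== SOURCE B (Python) =====
-- def solution(n):
--     # binary-search integer sqrt, then verify; O(log n) vs A's linear scan
--     lo, hi = 0, n
--     while lo < hi:
--         mid = (lo + hi + 1) // 2
--         if mid * mid <= n:
--             lo = mid
--         else:
--             hi = mid - 1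
--     return (lo + 1) ** 2 if lo * lo == n else -1
-- ===== Notes on version B (the rewrite author's own statement) =====
-- stated objective: faster
-- what changed: A scans candidate roots linearly upward until i^2 == n or i == n; B binary-searches the integer square root and checks r*r == n.
-- outside the precondition, e.g. on solution(0): A does not finish within the time limit, B returns 1
import Mathlib
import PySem

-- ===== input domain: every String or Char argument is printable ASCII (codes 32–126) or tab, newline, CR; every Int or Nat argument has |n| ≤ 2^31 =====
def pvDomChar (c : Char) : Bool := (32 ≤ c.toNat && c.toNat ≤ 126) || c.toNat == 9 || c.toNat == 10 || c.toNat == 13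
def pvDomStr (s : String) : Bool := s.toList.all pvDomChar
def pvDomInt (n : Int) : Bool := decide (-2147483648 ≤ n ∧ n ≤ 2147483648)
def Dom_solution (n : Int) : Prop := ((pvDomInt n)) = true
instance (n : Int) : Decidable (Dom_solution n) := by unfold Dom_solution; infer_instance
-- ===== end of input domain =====

-- B replaces A's upward linear scan of candidate roots by a binary search for the integer square root (faster).

-- ===== PORT A =====
-- A's 'while True' loop; ported with fuel (the loop runs at most n steps when 1 ≤ n,
-- and diverges for n ≤ 0, which Pre_solution excludes; 0 is A's never-returned initial 'answer').
def solutionLoopA (n : Int) : Int → Nat → Int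
  | _, 0 => 0
  | i, fuel + 1 =>
    if n = i ^ 2 then (i + 1) ^ 2
    else if n = i then -1
    else solutionLoopA n (i + 1) fuel

def solution (n : Int) : Int := solutionLoopA n 1 (n.toNat + 1)

-- ===== PORT B =====
-- Source B's 'while lo < hi' loop; the gap hi - lo shrinks every step, so fuel n.toNat + 1 suffices.
def solutionLoopB (n : Int) : Int → Int → Nat → Int
  | lo, _, 0 => lo
  | lo, hi, fuel + 1 =>
    if lo < hi then
      let mid := PySem.Int.floordiv (lo + hi + 1) 2
      if mid * mid ≤ n then solutionLoopB n mid hi fuel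
      else solutionLoopB n lo (mid - 1) fuel
    else lo

def solution_alt (n : Int) : Int :=
  let lo := solutionLoopB n 0 n (n.toNat + 1)
  if lo * lo = n then (lo + 1) ^ 2 else -1

-- ===== PRECONDITION & SPEC =====
-- A's loop never terminates for n ≤ 0 (no i ≥ 1 has i² = n or i = n), so Pre_ requires 1 ≤ n.
def Pre_solution (n : Int) : Prop := 1 ≤ n
instance (n : Int) : Decidable (Pre_solution n) := by unfold Pre_solution; infer_instance
def pvWitness_solution : Int := (7)

def Spec_solution (n : Int) (out : Int) : Prop := out = solution_alt n
instance (n : Int) (out : Int) : Decidable (Spec_solution n out) := by unfold Spec_solution; infer_instance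

-- ===== CLAIM (what is proved, stated in full; the proofs are below) =====
def Claim_equal_solution : Prop := ∀ (n : Int), Dom_solution n → Pre_solution n → Spec_solution n (solution n)

-- ===== LEMMAS AND PROOFS =====

-- characterization of Int.sqrt by its bracketing square
theorem pvSqrtUnique (a n : Int) (h0 : 0 ≤ a) (h1 : a * a ≤ n) (h2 : n < (a + 1) * (a + 1)) :
    Int.sqrt n = a := by
  have hn : 0 ≤ n := le_trans (mul_nonneg h0 h0) h1
  have ha : (a.toNat : Int) = a := Int.toNat_of_nonneg h0
  have hnn : (n.toNat : Int) = n := Int.toNat_of_nonneg hn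
  have h1' : a.toNat * a.toNat ≤ n.toNat := by
    have h : ((a.toNat * a.toNat : Nat) : Int) ≤ ((n.toNat : Nat) : Int) := by
      simp only [Nat.cast_mul]; rw [ha, hnn]; exact h1
    exact_mod_cast h
  have h2' : n.toNat < (a.toNat + 1) * (a.toNat + 1) := by
    have h : ((n.toNat : Nat) : Int) < (((a.toNat + 1) * (a.toNat + 1) : Nat) : Int) := by
      simp only [Nat.cast_mul, Nat.cast_add, Nat.cast_one]; rw [ha, hnn]; exact h2
    exact_mod_cast h
  have hu : Nat.sqrt n.toNat ≤ a.toNat := by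
    have := Nat.sqrt_lt.mpr h2'
    omega
  have hl : a.toNat ≤ Nat.sqrt n.toNat := Nat.le_sqrt.mpr h1'
  have he : Nat.sqrt n.toNat = a.toNat := le_antisymm hu hl
  unfold Int.sqrt
  rw [he, ha]

theorem pvSqrt_le (n : Int) (hn : 0 ≤ n) : Int.sqrt n * Int.sqrt n ≤ n := by
  have h := Nat.sqrt_le' n.toNat
  rw [pow_two] at h
  have h' : ((n.toNat.sqrt * n.toNat.sqrt : Nat) : Int) ≤ ((n.toNat : Nat) : Int) :=
    Nat.cast_le.mpr h
  simp only [Nat.cast_mul] at h'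
  rw [Int.toNat_of_nonneg hn] at h'
  unfold Int.sqrt
  exact h'

theorem pvSqrt_lt (n : Int) (hn : 0 ≤ n) : n < (Int.sqrt n + 1) * (Int.sqrt n + 1) := by
  have h := Nat.lt_succ_sqrt' n.toNat
  rw [pow_two, Nat.succ_eq_add_one] at h
  have h' : ((n.toNat : Nat) : Int) < (((n.toNat.sqrt + 1) * (n.toNat.sqrt + 1) : Nat) : Int) :=
    Nat.cast_lt.mpr h
  simp only [Nat.cast_mul, Nat.cast_add, Nat.cast_one] at h'
  rw [Int.toNat_of_nonneg hn] at h'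
  unfold Int.sqrt
  exact h'

theorem pvSqrt_pos (n : Int) (hn : 1 ≤ n) : 1 ≤ Int.sqrt n := by
  have h0 := Int.sqrt_nonneg n
  have hlt := pvSqrt_lt n (by omega)
  by_contra h
  have hz : Int.sqrt n = 0 := by omega
  rw [hz] at hlt
  norm_num at hlt
  omega

-- B-side loop: binary search converges to Int.sqrt n
theorem pvLoopB (n : Int) : ∀ (fuel : Nat) (lo hi : Int), 0 ≤ lo → lo ≤ hi →
    lo * lo ≤ n → n < (hi + 1) * (hi + 1) → (hi - lo).toNat ≤ fuel →
    solutionLoopB n lo hi fuel = Int.sqrt n := by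
  intro fuel
  induction fuel with
  | zero =>
    intro lo hi h0 hle h1 h2 hf
    have : lo = hi := by omega
    subst this
    simp [solutionLoopB]
    exact (pvSqrtUnique lo n h0 h1 h2).symm
  | succ fuel ih =>
    intro lo hi h0 hle h1 h2 hf
    by_cases hlt : lo < hi
    · have hmid : lo + 1 ≤ PySem.Int.floordiv (lo + hi + 1) 2 ∧
          PySem.Int.floordiv (lo + hi + 1) 2 ≤ hi := by
        rw [PySem.Int.floordiv_eq_ediv_of_pos (by omega)]
        omega
      simp only [solutionLoopB, if_pos hlt]
      set mid := PySem.Int.floordiv (lo + hi + 1) 2 with hm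
      by_cases hc : mid * mid ≤ n
      · rw [if_pos hc]
        exact ih mid hi (by omega) (by omega) hc h2 (by omega)
      · rw [if_neg hc]
        exact ih lo (mid - 1) h0 (by omega) h1 (by nlinarith [hmid.1, hmid.2]) (by omega)
    · have : lo = hi := by omega
      subst this
      simp [solutionLoopB]
      exact (pvSqrtUnique lo n h0 h1 h2).symm

-- A-side loop, perfect-square case: the scan stops at i = sqrt n
theorem pvLoopA_sq (n : Int) (hn : 1 ≤ n) (hsq : Int.sqrt n * Int.sqrt n = n) :
    ∀ (fuel : Nat) (i : Int), 1 ≤ i → i ≤ Int.sqrt n → (Int.sqrt n - i).toNat < fuel →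
    solutionLoopA n i fuel = (Int.sqrt n + 1) ^ 2 := by
  intro fuel
  induction fuel with
  | zero => intro i h1 h2 hf; omega
  | succ fuel ih =>
    intro i h1 h2 hf
    by_cases hi : i = Int.sqrt n
    · subst hi
      simp only [solutionLoopA]
      rw [if_pos (by rw [sq]; omega)]
    · have hilt : i < Int.sqrt n := lt_of_le_of_ne h2 hi
      have hne1 : n ≠ i ^ 2 := by
        intro h
        have : i * i < Int.sqrt n * Int.sqrt n := by nlinarith
        rw [sq] at h; omega
      have hsle : Int.sqrt n ≤ n := by nlinarith [pvSqrt_pos n hn]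
      have hne2 : n ≠ i := by omega
      simp only [solutionLoopA, if_neg hne1, if_neg hne2]
      exact ih (i + 1) (by omega) (by omega) (by omega)

-- A-side loop, non-square case: the scan runs to i = n and returns -1
theorem pvLoopA_ns (n : Int) (hn : 1 ≤ n) (hsq : Int.sqrt n * Int.sqrt n ≠ n) :
    ∀ (fuel : Nat) (i : Int), 1 ≤ i → i ≤ n → (n - i).toNat < fuel →
    solutionLoopA n i fuel = -1 := by
  intro fuel
  induction fuel with
  | zero => intro i h1 h2 hf; omega
  | succ fuel ih =>
    intro i h1 h2 hf
    have hne1 : n ≠ i ^ 2 := by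
      intro h
      have : Int.sqrt n = i := pvSqrtUnique i n (by omega) (by rw [sq] at h; omega)
        (by rw [sq] at h; nlinarith)
      rw [this] at hsq; rw [sq] at h; omega
    by_cases hi : n = i
    · simp only [solutionLoopA, if_neg hne1, if_pos hi]
    · simp only [solutionLoopA, if_neg hne1, if_neg hi]
      exact ih (i + 1) (by omega) (by omega) (by omega)

theorem solution_spec : Claim_equal_solution := by
  intro n _ hpre
  unfold Spec_solution solution solution_alt
  have hn : 1 ≤ n := hpre
  have hs1 := pvSqrt_pos n hn
  have hsle := pvSqrt_le n (by omega)
  have hslt := pvSqrt_lt n (by omega)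
  have hB : solutionLoopB n 0 n (n.toNat + 1) = Int.sqrt n :=
    pvLoopB n (n.toNat + 1) 0 n le_rfl (by omega) (by omega) (by nlinarith) (by omega)
  rw [hB]
  show solutionLoopA n 1 (n.toNat + 1) =
    if Int.sqrt n * Int.sqrt n = n then (Int.sqrt n + 1) ^ 2 else -1
  have hsn : Int.sqrt n ≤ n := by nlinarith
  by_cases hsq : Int.sqrt n * Int.sqrt n = n
  · rw [if_pos hsq]
    exact pvLoopA_sq n hn hsq (n.toNat + 1) 1 le_rfl hs1 (by omega)
  · rw [if_neg hsq]
    exact pvLoopA_ns n hn hsq (n.toNat + 1) 1 le_rfl hn (by omega)
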